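-- pv_equiv track=rewrite | github.com/helldotrs/layout-hellmak | unicorne-to-ez-converter/write_ed_noquotes.py | generate_layers
-- ===== SOURCE A (Python) =====
-- def generate_layers(num_layers):
--     layers = []
--     for i in range(1, num_layers + 1):  # Start from 1 to num_layers inclusive
--         layer = [
--             "KC_F12",
--             "KC_F11",
--             "KC_F10",
--             "KC_F9",
--             "KC_F8",
--             "KC_F7",
--             "KC_NO",
--
--             "KC_NO",
--             "KC_F1",
--             "KC_F2",
--             "KC_F3",
--             "KC_F4",
--             "KC_F5",
--             "KC_F6",
--
--             f"layer{i}row1pos01",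
--             f"layer{i}row1pos02",
--             f"layer{i}row1pos03",
--             f"layer{i}row1pos04",
--             f"layer{i}row1pos05",
--             f"layer{i}row1pos06",
--             "KC_NO",
--
--             "KC_NO",
--             f"layer{i}row1pos07",
--             f"layer{i}row1pos08",
--             f"layer{i}row1pos09",
--             f"layer{i}row1pos10",
--             f"layer{i}row1pos11",
--             f"layer{i}row1pos12",
--
--             f"layer{i}row2pos01",
--             f"layer{i}row2pos02",
--             f"layer{i}row2pos03",
--             f"layer{i}row2pos04",
--             f"layer{i}row2pos05",
--             f"layer{i}row2pos06",
--
--             f"layer{i}row2pos07",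
--             f"layer{i}row2pos08",
--             f"layer{i}row2pos09",
--             f"layer{i}row2pos10",
--             f"layer{i}row2pos11",
--             f"layer{i}row2pos12",
--
--             f"layer{i}row3pos01",
--             f"layer{i}row3pos02",
--             f"layer{i}row3pos03",
--             f"layer{i}row3pos04",
--             f"layer{i}row3pos05",
--             f"layer{i}row3pos06",
--             "KC_NO",
--
--             "KC_NO",
--             f"layer{i}row3pos07",
--             f"layer{i}row3pos08",
--             f"layer{i}row3pos09",
--             f"layer{i}row3pos10",
--             f"layer{i}row3pos11",
--             f"layer{i}row3pos12",
--
--             "KC_NO",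
--             "KC_NO",
--             "KC_NO",
--             "KC_NO",
--             f"layer{i}row4pos01",
--             f"layer{i}row4pos06",
--             "KC_NO",
--             "KC_NO",
--             "KC_NO",
--             "KC_NO",
--             "KC_NO",
--             "KC_NO",
--             "KC_NO",
--             "KC_NO",
--             "KC_NO",
--             "KC_NO",
--             f"layer{i}row4pos02",
--             f"layer{i}row4pos03",
--             "KC_NO",
--             "KC_NO",
--             f"layer{i}row4pos05",
--             f"layer{i}row4pos06"
--         ]
--         layers.append(layer)
--     return layers
-- ===== SOURCE B (Python) =====
-- # B: generate keycode names numerically from a compact segment description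
-- # (row/position ranges, KC_NO run lengths) instead of a long list of literals.
-- _F_LEFT = [f"KC_F{n}" for n in range(12, 6, -1)]   # F12 down to F7
-- _F_RIGHT = [f"KC_F{n}" for n in range(1, 7)]       # F1 up to F6
-- # _TAIL[r][p] = "row{r}pos{p:02d}": the layer-independent part of a placeholder
-- _TAIL = [[f"row{r}pos{p:02d}" for p in range(13)] for r in range(5)]
--
--
-- def _ph(pfx, r, lo, hi):
--     """Placeholders {pfx}row{r}pos{lo..hi}."""
--     t = _TAIL[r]
--     return [pfx + t[p] for p in range(lo, hi + 1)]
--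
--
-- def _no(k):
--     return ["KC_NO"] * k
--
--
-- def _layer(i):
--     p = f"layer{i}"
--     return (_F_LEFT + _no(2) + _F_RIGHT
--             + _ph(p, 1, 1, 6) + _no(2) + _ph(p, 1, 7, 12)
--             + _ph(p, 2, 1, 12)
--             + _ph(p, 3, 1, 6) + _no(2) + _ph(p, 3, 7, 12)
--             + _no(4) + _ph(p, 4, 1, 1) + _ph(p, 4, 6, 6) + _no(10)
--             + _ph(p, 4, 2, 3) + _no(2) + _ph(p, 4, 5, 6))
--
--
-- def generate_layers(num_layers):
--     return [_layer(i) for i in range(1, num_layers + 1)]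
-- ===== Notes on version B (the rewrite author's own statement) =====
-- stated objective: alternative
-- what changed: Replaced the long literal per-layer list with numeric generation: layer-independent name parts (F-key ranges, row/position tails with zero-padded positions) are computed once from ranges at module level, and each layer is the concatenation of generated segments (placeholder runs prefixed with layer{i}, KC_NO runs by list repetition).
import Mathlib
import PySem

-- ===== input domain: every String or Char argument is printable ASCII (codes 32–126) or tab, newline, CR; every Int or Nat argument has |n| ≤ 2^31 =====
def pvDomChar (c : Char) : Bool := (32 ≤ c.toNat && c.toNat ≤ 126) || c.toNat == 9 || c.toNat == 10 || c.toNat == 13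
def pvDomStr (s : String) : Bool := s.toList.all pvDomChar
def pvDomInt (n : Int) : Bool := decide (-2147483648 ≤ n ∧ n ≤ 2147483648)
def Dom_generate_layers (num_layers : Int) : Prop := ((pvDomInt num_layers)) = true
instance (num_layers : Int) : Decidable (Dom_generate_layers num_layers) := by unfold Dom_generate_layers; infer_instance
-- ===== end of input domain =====

-- B generates keycode names numerically from a compact segment description instead of A's literal per-layer list; objective: alternative structure, equal return value.


-- ===== PORT A =====
-- generate_layers: per-iteration literal layer list (one entry per key slot), appended to layers
def pvLayerA (i : Int) : List String :=
  ["KC_F12",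
   "KC_F11",
   "KC_F10",
   "KC_F9",
   "KC_F8",
   "KC_F7",
   "KC_NO",
   "KC_NO",
   "KC_F1",
   "KC_F2",
   "KC_F3",
   "KC_F4",
   "KC_F5",
   "KC_F6",
   "layer" ++ PySem.Int.toStr i ++ "row1pos01",
   "layer" ++ PySem.Int.toStr i ++ "row1pos02",
   "layer" ++ PySem.Int.toStr i ++ "row1pos03",
   "layer" ++ PySem.Int.toStr i ++ "row1pos04",
   "layer" ++ PySem.Int.toStr i ++ "row1pos05",
   "layer" ++ PySem.Int.toStr i ++ "row1pos06",
   "KC_NO",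
   "KC_NO",
   "layer" ++ PySem.Int.toStr i ++ "row1pos07",
   "layer" ++ PySem.Int.toStr i ++ "row1pos08",
   "layer" ++ PySem.Int.toStr i ++ "row1pos09",
   "layer" ++ PySem.Int.toStr i ++ "row1pos10",
   "layer" ++ PySem.Int.toStr i ++ "row1pos11",
   "layer" ++ PySem.Int.toStr i ++ "row1pos12",
   "layer" ++ PySem.Int.toStr i ++ "row2pos01",
   "layer" ++ PySem.Int.toStr i ++ "row2pos02",
   "layer" ++ PySem.Int.toStr i ++ "row2pos03",
   "layer" ++ PySem.Int.toStr i ++ "row2pos04",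
   "layer" ++ PySem.Int.toStr i ++ "row2pos05",
   "layer" ++ PySem.Int.toStr i ++ "row2pos06",
   "layer" ++ PySem.Int.toStr i ++ "row2pos07",
   "layer" ++ PySem.Int.toStr i ++ "row2pos08",
   "layer" ++ PySem.Int.toStr i ++ "row2pos09",
   "layer" ++ PySem.Int.toStr i ++ "row2pos10",
   "layer" ++ PySem.Int.toStr i ++ "row2pos11",
   "layer" ++ PySem.Int.toStr i ++ "row2pos12",
   "layer" ++ PySem.Int.toStr i ++ "row3pos01",
   "layer" ++ PySem.Int.toStr i ++ "row3pos02",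
   "layer" ++ PySem.Int.toStr i ++ "row3pos03",
   "layer" ++ PySem.Int.toStr i ++ "row3pos04",
   "layer" ++ PySem.Int.toStr i ++ "row3pos05",
   "layer" ++ PySem.Int.toStr i ++ "row3pos06",
   "KC_NO",
   "KC_NO",
   "layer" ++ PySem.Int.toStr i ++ "row3pos07",
   "layer" ++ PySem.Int.toStr i ++ "row3pos08",
   "layer" ++ PySem.Int.toStr i ++ "row3pos09",
   "layer" ++ PySem.Int.toStr i ++ "row3pos10",
   "layer" ++ PySem.Int.toStr i ++ "row3pos11",
   "layer" ++ PySem.Int.toStr i ++ "row3pos12",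
   "KC_NO",
   "KC_NO",
   "KC_NO",
   "KC_NO",
   "layer" ++ PySem.Int.toStr i ++ "row4pos01",
   "layer" ++ PySem.Int.toStr i ++ "row4pos06",
   "KC_NO",
   "KC_NO",
   "KC_NO",
   "KC_NO",
   "KC_NO",
   "KC_NO",
   "KC_NO",
   "KC_NO",
   "KC_NO",
   "KC_NO",
   "layer" ++ PySem.Int.toStr i ++ "row4pos02",
   "layer" ++ PySem.Int.toStr i ++ "row4pos03",
   "KC_NO",
   "KC_NO",
   "layer" ++ PySem.Int.toStr i ++ "row4pos05",
   "layer" ++ PySem.Int.toStr i ++ "row4pos06"]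

def generate_layers (num_layers : Int) : List (List String) :=
  (PySem.List.pyRange 1 (num_layers + 1) 1).foldl
    (fun layers i => layers ++ [pvLayerA i]) []

-- ===== PORT B =====
-- f"{p:02d}" ported by hand: exact for nonnegative p (all positions here are 0..12)
def pvPad2 (p : Int) : String :=
  if p < 10 && 0 <= p then "0" ++ PySem.Int.toStr p else PySem.Int.toStr p

def pvFLeft : List String :=
  (PySem.List.pyRange 12 6 (-1)).map (fun n => "KC_F" ++ PySem.Int.toStr n)

def pvFRight : List String :=
  (PySem.List.pyRange 1 7 1).map (fun n => "KC_F" ++ PySem.Int.toStr n)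

-- _TAIL[r][p] = "row{r}pos{p:02d}"
def pvTail : List (List String) :=
  (PySem.List.pyRange 0 5 1).map (fun r =>
    (PySem.List.pyRange 0 13 1).map (fun p =>
      "row" ++ PySem.Int.toStr r ++ "pos" ++ pvPad2 p))

-- _ph(pfx, r, lo, hi); the indexings _TAIL[r], t[p] are literal and in range in
-- every call, so the total pyGetD is exact here
def pvPh (pfx : String) (r lo hi : Int) : List String :=
  let t := PySem.List.pyGetD pvTail r []
  (PySem.List.pyRange lo (hi + 1) 1).map (fun p => pfx ++ PySem.List.pyGetD t p "")

-- _no(k): ["KC_NO"] * k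
def pvNo (k : Nat) : List String := List.replicate k "KC_NO"

-- _layer(i): concatenation of generated segments
def pvLayerB (i : Int) : List String :=
  let p := "layer" ++ PySem.Int.toStr i
  pvFLeft ++ pvNo 2 ++ pvFRight
    ++ pvPh p 1 1 6 ++ pvNo 2 ++ pvPh p 1 7 12
    ++ pvPh p 2 1 12
    ++ pvPh p 3 1 6 ++ pvNo 2 ++ pvPh p 3 7 12
    ++ pvNo 4 ++ pvPh p 4 1 1 ++ pvPh p 4 6 6 ++ pvNo 10
    ++ pvPh p 4 2 3 ++ pvNo 2 ++ pvPh p 4 5 6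

def generate_layers_alt (num_layers : Int) : List (List String) :=
  (PySem.List.pyRange 1 (num_layers + 1) 1).map pvLayerB

-- ===== PRECONDITION & SPEC =====
def Spec_generate_layers (num_layers : Int) (out : List (List String)) : Prop := out = generate_layers_alt num_layers
instance (num_layers : Int) (out : List (List String)) : Decidable (Spec_generate_layers num_layers out) := by unfold Spec_generate_layers; infer_instance

-- ===== CLAIM (what is proved, stated in full; the proofs are below) =====
def Claim_equal_generate_layers : Prop := ∀ (num_layers : Int), Dom_generate_layers num_layers → Spec_generate_layers num_layers (generate_layers num_layers)

-- ===== LEMMAS AND PROOFS =====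
-- Each i produces the same layer from either program.
theorem pvLayer_eq (i : Int) : pvLayerA i = pvLayerB i := by
  have hl : pvFLeft = ["KC_F12", "KC_F11", "KC_F10", "KC_F9", "KC_F8", "KC_F7"] := by decide
  have hr : pvFRight = ["KC_F1", "KC_F2", "KC_F3", "KC_F4", "KC_F5", "KC_F6"] := by decide
  have h2 : PySem.List.pyRange 1 7 1 = [1, 2, 3, 4, 5, 6] := by decide
  have h3 : PySem.List.pyRange 7 13 1 = [7, 8, 9, 10, 11, 12] := by decide
  have h4 : PySem.List.pyRange 1 13 1 = [1, 2, 3, 4, 5, 6, 7, 8, 9, 10, 11, 12] := by decide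
  have h5 : PySem.List.pyRange 1 2 1 = [1] := by decide
  have h6 : PySem.List.pyRange 6 7 1 = [6] := by decide
  have h7 : PySem.List.pyRange 2 4 1 = [2, 3] := by decide
  have h8 : PySem.List.pyRange 5 7 1 = [5, 6] := by decide
  simp [pvLayerA, pvLayerB, pvPh, pvNo, hl, hr, h2, h3, h4, h5, h6, h7, h8,
        PySem.Int.toStr, PySem.Int.toChars, String.append_assoc]
  decide

-- ===== VERDICT (by name: the statement is the Claim_ definition above) =====
theorem generate_layers_spec : Claim_equal_generate_layers := by
  intro n _
  unfold Spec_generate_layers generate_layers generate_layers_alt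
  rw [PySem.List.foldl_append_singleton_eq_map]
  simp [pvLayer_eq]
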